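-- pv_equiv track=rewrite | github.com/nayeem-ahmad/messagehub | campaign_processor.py | _validate_email_settings
-- ===== SOURCE A (Python) =====
-- def _validate_email_settings(settings, method):
--     """Validate email configuration"""
--     if method == "SMTP":
--         required = ['sender_email', 'sender_pwd', 'smtp_server', 'smtp_port']
--         return all(settings.get(key) for key in required)
--     elif method == "SendGrid":
--         return bool(settings.get('sendgrid_api_key'))
--     elif method == "Amazon SES":
--         required = ['ses_access_key', 'ses_secret_key', 'ses_region']
--         return all(settings.get(key) for key in required)
--     return False
-- ===== SOURCE B (Python) =====
-- _REQUIRED = {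
--     "SMTP": frozenset({'sender_email', 'sender_pwd', 'smtp_server', 'smtp_port'}),
--     "SendGrid": frozenset({'sendgrid_api_key'}),
--     "Amazon SES": frozenset({'ses_access_key', 'ses_secret_key', 'ses_region'}),
-- }
--
-- def _validate_email_settings(settings, method):
--     """Validate email configuration"""
--     required = _REQUIRED.get(method)
--     if required is None:
--         return False
--     truthy = {k for k, v in settings.items() if v}
--     return required <= truthy
-- ===== Notes on version B (the rewrite author's own statement) =====
-- stated objective: alternative
-- what changed: Instead of probing the settings dict once per required key through an if/elif dispatch, B makes one pass over settings.items() building the set of keys with truthy values and then answers with a frozenset subset test against a method-to-required-keys table.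
import Mathlib
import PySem

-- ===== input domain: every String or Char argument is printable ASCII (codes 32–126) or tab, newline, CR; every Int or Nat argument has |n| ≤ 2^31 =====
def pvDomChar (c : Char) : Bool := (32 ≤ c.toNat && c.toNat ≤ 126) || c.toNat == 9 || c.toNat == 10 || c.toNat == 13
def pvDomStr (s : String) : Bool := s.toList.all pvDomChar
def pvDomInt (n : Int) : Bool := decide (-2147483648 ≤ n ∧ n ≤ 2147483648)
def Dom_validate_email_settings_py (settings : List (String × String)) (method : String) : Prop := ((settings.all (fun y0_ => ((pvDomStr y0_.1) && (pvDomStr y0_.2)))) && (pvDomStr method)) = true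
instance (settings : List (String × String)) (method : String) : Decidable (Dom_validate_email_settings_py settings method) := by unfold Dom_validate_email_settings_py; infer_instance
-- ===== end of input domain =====

-- B inverts the traversal: one pass over the settings items collecting the set of truthy keys,
-- then a subset test against a method → required-keys table (objective: alternative).

-- ===== PORT A =====
-- settings.get(key) is truthy iff the first match exists and is non-empty; getD with default "" captures that exactly.
def pvTruthyGet (settings : List (String × String)) (key : String) : Bool :=
  !(PySem.Dict.getD (PySem.Dict.mk settings) key "").isEmpty

def validate_email_settings_py (settings : List (String × String)) (method : String) : Bool :=
  if method == "SMTP" then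
    (["sender_email", "sender_pwd", "smtp_server", "smtp_port"]).all (fun key => pvTruthyGet settings key)
  else if method == "SendGrid" then
    pvTruthyGet settings "sendgrid_api_key"
  else if method == "Amazon SES" then
    (["ses_access_key", "ses_secret_key", "ses_region"]).all (fun key => pvTruthyGet settings key)
  else
    false

-- ===== PORT B =====
def pvRequired : PySem.Dict String (List String) :=
  PySem.Dict.mk
    [("SMTP", ["sender_email", "sender_pwd", "smtp_server", "smtp_port"]),
     ("SendGrid", ["sendgrid_api_key"]),
     ("Amazon SES", ["ses_access_key", "ses_secret_key", "ses_region"])]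

-- {k for k, v in settings.items() if v}: a dict's items have unique keys (first occurrence wins
-- under the assoc-list convention), so later duplicates in the list representation are skipped.
def pvTruthyKeys : List (String × String) → PySem.Set String → PySem.Set String
  | [], _ => PySem.Set.empty
  | (k, v) :: rest, seen =>
      if PySem.Set.contains seen k then pvTruthyKeys rest seen
      else if v.isEmpty then pvTruthyKeys rest (PySem.Set.add seen k)
      else PySem.Set.add (pvTruthyKeys rest (PySem.Set.add seen k)) k

def validate_email_settings_py_alt (settings : List (String × String)) (method : String) : Bool :=
  match PySem.Dict.get? pvRequired method with
  | none => false
  | some required =>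
      let truthy := pvTruthyKeys settings PySem.Set.empty
      PySem.Set.issubset required truthy

-- ===== PRECONDITION & SPEC =====
def Spec_validate_email_settings_py (settings : List (String × String)) (method : String) (out : Bool) : Prop := out = validate_email_settings_py_alt settings method
instance (settings : List (String × String)) (method : String) (out : Bool) : Decidable (Spec_validate_email_settings_py settings method out) := by unfold Spec_validate_email_settings_py; infer_instance

-- ===== CLAIM (what is proved, stated in full; the proofs are below) =====
def Claim_equal_validate_email_settings_py : Prop := ∀ (settings : List (String × String)) (method : String), Dom_validate_email_settings_py settings method → Spec_validate_email_settings_py settings method (validate_email_settings_py settings method)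

-- ===== LEMMAS AND PROOFS =====

-- membership in the truthy-key set = key not yet seen and its first match in settings is non-empty
theorem mem_pvTruthyKeys (settings : List (String × String)) :
    ∀ (seen : PySem.Set String) (k : String),
      k ∈ pvTruthyKeys settings seen ↔
        (k ∉ seen ∧ PySem.Dict.getD (PySem.Dict.mk settings) k "" ≠ "") := by
  induction settings with
  | nil =>
      intro seen k
      simp [pvTruthyKeys, PySem.Set.empty, PySem.Dict.getD_eq_get?_getD, PySem.Dict.get?]
  | cons p rest ih =>
      intro seen k
      obtain ⟨a, v⟩ := p
      by_cases hseen : a ∈ seen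
      · by_cases hak : a = k
        · subst hak
          simp [pvTruthyKeys, hseen, ih]
        · simp [pvTruthyKeys, hseen, ih, PySem.Dict.getD_eq_get?_getD,
            PySem.Dict.get?_mk_cons, hak]
      · by_cases hv : v = ""
        · by_cases hak : a = k
          · subst hak
            simp [pvTruthyKeys, hseen, hv, ih,
              PySem.Dict.getD_eq_get?_getD, PySem.Dict.get?_mk_cons]
          · simp [pvTruthyKeys, hseen, hv, ih,
              PySem.Dict.getD_eq_get?_getD, PySem.Dict.get?_mk_cons, hak, Ne.symm hak]
        · by_cases hak : a = k
          · subst hak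
            simp [pvTruthyKeys, hseen, hv, PySem.Set.mem_add,
              PySem.Dict.getD_eq_get?_getD, PySem.Dict.get?_mk_cons]
          · simp [pvTruthyKeys, hseen, hv, ih,
              PySem.Dict.getD_eq_get?_getD, PySem.Dict.get?_mk_cons, hak, Ne.symm hak]

-- Bool form, pointwise: the subset test's inner contains equals A's truthy get
theorem contains_pvTruthyKeys (settings : List (String × String)) (k : String) :
    PySem.Set.contains (pvTruthyKeys settings []) k = pvTruthyGet settings k := by
  have h : k ∈ pvTruthyKeys settings [] ↔ PySem.Dict.getD (PySem.Dict.mk settings) k "" ≠ "" := by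
    simpa [PySem.Set.empty] using mem_pvTruthyKeys settings [] k
  by_cases hval : PySem.Dict.getD (PySem.Dict.mk settings) k "" = ""
  · have hm : k ∉ pvTruthyKeys settings [] := fun hx => (h.mp hx) hval
    simp [PySem.Set.contains, pvTruthyGet, hval, hm]
  · have hm : k ∈ pvTruthyKeys settings [] := h.mpr hval
    have hne : (PySem.Dict.getD (PySem.Dict.mk settings) k "").isEmpty = false := by
      cases hse : (PySem.Dict.getD (PySem.Dict.mk settings) k "").isEmpty
      · rfl
      · exact absurd (String.isEmpty_iff.mp hse) hval
    simp [PySem.Set.contains, pvTruthyGet, hm, hne]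

-- the subset test over a required list equals A's all-of-truthy-gets
theorem pvSubset_eq_all (settings : List (String × String)) (req : List String) :
    PySem.Set.issubset req (pvTruthyKeys settings [])
      = req.all (fun key => pvTruthyGet settings key) := by
  simp only [PySem.Set.issubset, contains_pvTruthyKeys]

-- ===== VERDICT (by name: the statement is the Claim_ definition above) =====
theorem validate_email_settings_py_spec : Claim_equal_validate_email_settings_py := by
  intro settings method _
  unfold Spec_validate_email_settings_py validate_email_settings_py validate_email_settings_py_alt pvRequired
  by_cases h1 : method = "SMTP"
  · simp [h1, PySem.Dict.get?_mk_cons, pvSubset_eq_all settings]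
  · by_cases h2 : method = "SendGrid"
    · simp [h2, PySem.Dict.get?_mk_cons, pvSubset_eq_all settings, pvTruthyGet]
    · by_cases h3 : method = "Amazon SES"
      · simp [h3, PySem.Dict.get?_mk_cons, pvSubset_eq_all settings]
      · simp [h1, h2, h3, Ne.symm h1, Ne.symm h2, Ne.symm h3, PySem.Dict.get?]
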